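-- pv_equiv track=rewrite | github.com/joshuamkite/advent-of-code | 2023/day-03/main.py | sum_part_numbers
-- ===== SOURCE A (Python) =====
-- def parse_input(schematic):
--     return [list(line) for line in schematic.splitlines() if line.strip()]
--
-- def is_symbol(cell):
--     return cell not in "0123456789."
--
-- def get_full_number(grid, r, c):
--     # Get the full number, moving left first, then right
--     number = ''
--     left = c
--     while left >= 0 and grid[r][left].isdigit():
--         left -= 1
--     left += 1  # Move back to the first digit
--     while left < len(grid[r]) and grid[r][left].isdigit():
--         number += grid[r][left]
--         left += 1
--     return int(number), left - 1  # Return the number and the last digit position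
--
-- def is_adjacent_to_symbol(grid, r, start_c, end_c):
--     directions = [(-1, -1), (-1, 0), (-1, 1), (0, -1), (0, 1), (1, -1), (1, 0), (1, 1)]
--     for c in range(start_c, end_c + 1):
--         for dr, dc in directions:
--             nr, nc = r + dr, c + dc
--             if 0 <= nr < len(grid) and 0 <= nc < len(grid[nr]):
--                 if is_symbol(grid[nr][nc]):
--                     return True
--     return False
--
-- def sum_part_numbers(schematic):
--     grid = parse_input(schematic)
--     total = 0
--
--     for r in range(len(grid)):
--         c = 0
--         while c < len(grid[r]):
--             if grid[r][c].isdigit():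
--                 number, end_c = get_full_number(grid, r, c)
--                 if is_adjacent_to_symbol(grid, r, c, end_c):
--                     total += number
--                 c = end_c + 1
--             else:
--                 c += 1
--
--     return total
-- ===== SOURCE B (Python) =====
-- def sum_part_numbers(schematic):
--     grid = [list(line) for line in schematic.splitlines() if line.strip()]
--     # First pass: shade every cell within Chebyshev distance 1 of a symbol.
--     shaded = set()
--     for r, row in enumerate(grid):
--         for c, cell in enumerate(row):
--             if cell not in "0123456789.":
--                 for dr in (-1, 0, 1):
--                     for dc in (-1, 0, 1):
--                         shaded.add((r + dr, c + dc))
--     # Second pass: one fold per row collecting maximal digit runs, then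
--     # sum the runs that occupy at least one shaded cell.
--     total = 0
--     for r, row in enumerate(grid):
--         for start, stop, value in row_runs(row):
--             if any((r, c) in shaded for c in range(start, stop)):
--                 total += value
--     return total
--
-- def row_runs(row):
--     """Maximal digit runs of a row as (start, stop, value), via one fold."""
--     runs, cur = [], None  # cur = (start index, digits so far)
--     for c, ch in enumerate(row):
--         if ch.isdigit():
--             cur = (c, ch) if cur is None else (cur[0], cur[1] + ch)
--         elif cur is not None:
--             runs.append((cur[0], c, int(cur[1])))
--             cur = None
--     if cur is not None:
--         runs.append((cur[0], len(row), int(cur[1])))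
--     return runs
-- ===== Notes on version B (the rewrite author's own statement) =====
-- stated objective: alternative
-- what changed: Inverted the adjacency test: instead of probing the 8 neighbours of every digit for a symbol (with a leftward rescan to find each number's start), B first shades the 3x3 neighbourhood of every symbol into a set, then extracts each row's maximal digit runs with a single left-to-right fold and sums the runs touching a shaded cell.
import Mathlib
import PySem

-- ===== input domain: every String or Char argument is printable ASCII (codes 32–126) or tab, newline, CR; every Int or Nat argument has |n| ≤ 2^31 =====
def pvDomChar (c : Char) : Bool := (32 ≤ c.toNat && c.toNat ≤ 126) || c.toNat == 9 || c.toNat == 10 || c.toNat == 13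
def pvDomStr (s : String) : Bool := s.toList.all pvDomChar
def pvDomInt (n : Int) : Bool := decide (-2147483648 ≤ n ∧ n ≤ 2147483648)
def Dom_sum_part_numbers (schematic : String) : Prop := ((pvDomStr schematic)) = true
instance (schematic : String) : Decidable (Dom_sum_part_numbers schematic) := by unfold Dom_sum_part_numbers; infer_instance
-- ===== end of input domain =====

-- B replaces A's per-digit 8-direction symbol probing (with a leftward rescan per number)
-- by one pass shading every symbol's 3x3 neighbourhood into a set plus one fold per row
-- collecting maximal digit runs; same results, alternative algorithm (no speed claim).

-- ===== PORT A =====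
-- [list(line) for line in schematic.splitlines() if line.strip()]
def parseInputA (schematic : String) : List (List Char) :=
  ((PySem.Str.splitlines schematic).filter
    (fun line => !(PySem.Str.strip line).toList.isEmpty)).map (fun line => line.toList)

-- cell not in "0123456789."  (cell is a single character, so 'in' is character membership)
def isSymbolA (cell : Char) : Bool := !(("0123456789.".toList).contains cell)

-- while left >= 0 and grid[r][left].isdigit(): left -= 1;  left += 1
-- (returns the final value of left; the index is in range at every reachable call)
def gfnLeftA (row : List Char) (l : Nat) : Nat :=
  if h : l < row.length then
    if PySem.Chars.isdigit row[l] then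
      if l = 0 then 0 else gfnLeftA row (l - 1)
    else l + 1
  else l + 1
termination_by l
decreasing_by omega

-- while left < len(grid[r]) and grid[r][left].isdigit(): number += grid[r][left]; left += 1
def gfnRightA (row : List Char) (l : Nat) (num : List Char) : List Char × Nat :=
  if h : l < row.length then
    if PySem.Chars.isdigit row[l] then gfnRightA row (l + 1) (num ++ [row[l]]) else (num, l)
  else (num, l)
termination_by row.length - l

-- int(number): number is a nonempty digit string at every reachable call, so getD 0 is exact
def getFullNumberA (row : List Char) (c : Nat) : Int × Nat :=
  let p := gfnRightA row (gfnLeftA row c) []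
  ((PySem.Int.ofChars? p.1).getD 0, p.2 - 1)

def directionsA : List (Int × Int) :=
  [(-1, -1), (-1, 0), (-1, 1), (0, -1), (0, 1), (1, -1), (1, 0), (1, 1)]

def isAdjacentA (grid : List (List Char)) (r startC endC : Int) : Bool :=
  (PySem.List.pyRange startC (endC + 1) 1).any (fun c =>
    directionsA.any (fun d =>
      let nr := r + d.1
      let nc := c + d.2
      decide (0 ≤ nr) && decide (nr < (grid.length : Int)) &&
        (let nrow := grid.getD nr.toNat []
         decide (0 ≤ nc) && decide (nc < (nrow.length : Int)) &&
           isSymbolA (nrow.getD nc.toNat ' '))))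

-- termination facts for A's inner while loop (the port cites getFullNumberA_snd_ge)
theorem gfnRightA_ge (row : List Char) (l : Nat) (num : List Char) :
    l ≤ (gfnRightA row l num).2 := by
  fun_induction gfnRightA row l num with
  | case1 l num h hd ih => omega
  | case2 l num h hd => simp
  | case3 l num h => simp

theorem gfnRightA_digits_ge (row : List Char) (c : Nat) :
    ∀ l num, l ≤ c → c < row.length →
    (∀ i, l ≤ i → i ≤ c → PySem.Chars.isdigit (row.getD i ' ') = true) →
    c + 1 ≤ (gfnRightA row l num).2 := by
  intro l
  induction hn : c + 1 - l generalizing l with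
  | zero => intro num h1 h2 h3; omega
  | succ n ih =>
    intro num h1 h2 h3
    have hl : l < row.length := by omega
    have hd : PySem.Chars.isdigit row[l] = true := by
      have := h3 l (le_refl l) h1
      rwa [List.getD_eq_getElem _ _ hl] at this
    rw [gfnRightA, dif_pos hl, if_pos hd]
    rcases Nat.eq_or_lt_of_le h1 with he | hlt
    · subst he; exact gfnRightA_ge row (l + 1) _
    · exact ih (l + 1) (by omega) _ (by omega) h2 (fun i hi1 hi2 => h3 i (by omega) hi2)

theorem gfnLeftA_le_digits (row : List Char) (c : Nat) (h : c < row.length)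
    (hd : PySem.Chars.isdigit row[c] = true) :
    gfnLeftA row c ≤ c ∧
      (∀ i, gfnLeftA row c ≤ i → i ≤ c → PySem.Chars.isdigit (row.getD i ' ') = true) := by
  induction c with
  | zero =>
    rw [gfnLeftA, dif_pos h, if_pos hd, if_pos rfl]
    exact ⟨le_refl 0, fun i h1 h2 => by
      have : i = 0 := by omega
      subst this; rwa [List.getD_eq_getElem _ _ h]⟩
  | succ m ih =>
    rw [gfnLeftA, dif_pos h, if_pos hd, if_neg (Nat.succ_ne_zero m)]
    simp only [Nat.add_sub_cancel]
    have hm : m < row.length := by omega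
    by_cases hdm : PySem.Chars.isdigit row[m] = true
    · obtain ⟨h1, h2⟩ := ih hm hdm
      refine ⟨by omega, fun i hi1 hi2 => ?_⟩
      rcases Nat.lt_or_ge i (m + 1) with hlt | hge
      · exact h2 i hi1 (by omega)
      · have : i = m + 1 := by omega
        subst this; rwa [List.getD_eq_getElem _ _ h]
    · rw [gfnLeftA, dif_pos hm, if_neg hdm]
      refine ⟨by omega, fun i hi1 hi2 => ?_⟩
      have : i = m + 1 := by omega
      subst this; rwa [List.getD_eq_getElem _ _ h]

theorem getFullNumberA_snd_ge (row : List Char) (c : Nat) (h : c < row.length)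
    (hd : PySem.Chars.isdigit row[c] = true) : c ≤ (getFullNumberA row c).2 := by
  obtain ⟨h1, h2⟩ := gfnLeftA_le_digits row c h hd
  have := gfnRightA_digits_ge row c (gfnLeftA row c) [] h1 h h2
  simp only [getFullNumberA]
  omega

def rowLoopA (grid : List (List Char)) (r : Int) (row : List Char) (c : Nat) (total : Int) : Int :=
  if h : c < row.length then
    if hd : PySem.Chars.isdigit row[c] then
      let p := getFullNumberA row c
      rowLoopA grid r row (p.2 + 1)
        (if isAdjacentA grid r (c : Int) ((p.2 : Nat) : Int) then total + p.1 else total)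
    else rowLoopA grid r row (c + 1) total
  else total
termination_by row.length - c
decreasing_by
  · have := getFullNumberA_snd_ge row c h hd; omega
  · omega

def sum_part_numbers (schematic : String) : Int :=
  let grid := parseInputA schematic
  (PySem.List.pyRange 0 (PySem.List.len grid) 1).foldl
    (fun total r => rowLoopA grid r (grid.getD r.toNat []) 0 total) 0

-- ===== PORT B =====
def parseInputB (schematic : String) : List (List Char) :=
  ((PySem.Str.splitlines schematic).filter
    (fun line => !(PySem.Str.strip line).toList.isEmpty)).map (fun line => line.toList)

def isSymbolB (cell : Char) : Bool := !(("0123456789.".toList).contains cell)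

-- for dr in (-1, 0, 1): for dc in (-1, 0, 1): shaded.add((r + dr, c + dc))
def shadeB (s : PySem.Set (Int × Int)) (r c : Int) : PySem.Set (Int × Int) :=
  ([-1, 0, 1] : List Int).foldl (fun s dr =>
    ([-1, 0, 1] : List Int).foldl (fun s dc => PySem.Set.add s (r + dr, c + dc)) s) s

def shadedSetB (grid : List (List Char)) : PySem.Set (Int × Int) :=
  (PySem.List.enumerate grid).foldl (fun s rp =>
    (PySem.List.enumerate rp.2).foldl (fun s cp =>
      if isSymbolB cp.2 then shadeB s rp.1 cp.1 else s) s) PySem.Set.empty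

-- one step of row_runs' fold; int(cur[1]) is a nonempty digit string, so getD 0 is exact
def rowRunsStepB (st : List (Int × Int × Int) × Option (Int × List Char)) (p : Int × Char) :
    List (Int × Int × Int) × Option (Int × List Char) :=
  if PySem.Chars.isdigit p.2 then
    match st.2 with
    | none => (st.1, some (p.1, [p.2]))
    | some cur => (st.1, some (cur.1, cur.2 ++ [p.2]))
  else
    match st.2 with
    | none => st
    | some cur => (st.1 ++ [(cur.1, p.1, (PySem.Int.ofChars? cur.2).getD 0)], none)

def rowRunsB (row : List Char) : List (Int × Int × Int) :=
  let st := (PySem.List.enumerate row).foldl rowRunsStepB ([], none)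
  match st.2 with
  | none => st.1
  | some cur => st.1 ++ [(cur.1, PySem.List.len row, (PySem.Int.ofChars? cur.2).getD 0)]

def sum_part_numbers_alt (schematic : String) : Int :=
  let grid := parseInputB schematic
  let shaded := shadedSetB grid
  (PySem.List.enumerate grid).foldl (fun total rp =>
    (rowRunsB rp.2).foldl (fun total run =>
      if (PySem.List.pyRange run.1 run.2.1 1).any
          (fun c => PySem.Set.contains shaded (rp.1, c))
      then total + run.2.2 else total) total) 0

-- ===== PRECONDITION & SPEC =====
def Spec_sum_part_numbers (schematic : String) (out : Int) : Prop := out = sum_part_numbers_alt schematic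
instance (schematic : String) (out : Int) : Decidable (Spec_sum_part_numbers schematic out) := by unfold Spec_sum_part_numbers; infer_instance

-- ===== CLAIM (what is proved, stated in full; the proofs are below) =====
def Claim_equal_sum_part_numbers : Prop := ∀ (schematic : String), Dom_sum_part_numbers schematic → Spec_sum_part_numbers schematic (sum_part_numbers schematic)

-- ===== LEMMAS AND PROOFS =====

-- digit test with an out-of-range default
def dAt (row : List Char) (i : Nat) : Bool := PySem.Chars.isdigit (row.getD i ' ')

theorem gfnRightA_snd_gt (row : List Char) (c : Nat) (num : List Char) (h : c < row.length)
    (hd : PySem.Chars.isdigit row[c] = true) : c + 1 ≤ (gfnRightA row c num).2 := by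
  rw [gfnRightA, dif_pos h, if_pos hd]
  exact gfnRightA_ge row (c + 1) _

-- the canonical run decomposition of a row from position c: (start, stop, value)
def runsFromA (row : List Char) (c : Nat) : List (Int × Int × Int) :=
  if h : c < row.length then
    if hd : PySem.Chars.isdigit row[c] then
      let g := gfnRightA row c []
      ((c : Int), ((g.2 : Nat) : Int), (PySem.Int.ofChars? g.1).getD 0) :: runsFromA row g.2
    else runsFromA row (c + 1)
  else []
termination_by row.length - c
decreasing_by
  · have := gfnRightA_snd_gt row c [] h hd; omega
  · omega

theorem dAt_eq_isdigit (row : List Char) (i : Nat) (h : i < row.length) :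
    dAt row i = PySem.Chars.isdigit row[i] := by
  rw [dAt, List.getD_eq_getElem _ _ h]

theorem gfnRightA_le_len (row : List Char) (l : Nat) (num : List Char) (h : l ≤ row.length) :
    (gfnRightA row l num).2 ≤ row.length := by
  fun_induction gfnRightA row l num with
  | case1 l num h1 hd ih => exact ih (by omega)
  | case2 l num h1 hd => simpa using by omega
  | case3 l num h1 => simpa using by omega

theorem gfnRightA_stop_not_dig (row : List Char) (l : Nat) (num : List Char) :
    dAt row (gfnRightA row l num).2 = false := by
  fun_induction gfnRightA row l num with
  | case1 l num h hd ih => exact ih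
  | case2 l num h hd => simpa [dAt_eq_isdigit row l h] using hd
  | case3 l num h =>
    simp only [dAt, List.getD_eq_getElem?_getD]
    rw [List.getElem?_eq_none (by omega)]
    decide

theorem gfnRightA_digits (row : List Char) (l : Nat) (num : List Char) :
    ∀ i, l ≤ i → i < (gfnRightA row l num).2 → dAt row i = true := by
  fun_induction gfnRightA row l num with
  | case1 l num h hd ih =>
    intro i h1 h2
    rcases Nat.eq_or_lt_of_le h1 with he | hlt
    · rw [← he]; rwa [dAt_eq_isdigit row l h]
    · exact ih i (by omega) h2
  | case2 l num h hd => intro i h1 h2; simp at h2; omega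
  | case3 l num h => intro i h1 h2; simp at h2; omega

-- the stop/value pair of a whole run
theorem runsFromA_props (row : List Char) : ∀ (n c : Nat), row.length - c ≤ n →
    ∀ run ∈ runsFromA row c, ∃ s stop : Nat,
      run.1 = (s : Int) ∧ run.2.1 = (stop : Int) ∧ c ≤ s ∧ s < stop ∧ stop ≤ row.length ∧
      ∀ i, s ≤ i → i < stop → dAt row i = true := by
  intro n
  induction n with
  | zero =>
    intro c h run hr
    rw [runsFromA, dif_neg (by omega)] at hr
    simp at hr
  | succ n ih =>
    intro c h run hr
    by_cases hl : c < row.length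
    · rw [runsFromA, dif_pos hl] at hr
      by_cases hd : PySem.Chars.isdigit (row[c]'hl) = true
      · rw [dif_pos hd] at hr
        have hstop := gfnRightA_snd_gt row c [] hl hd
        rcases List.mem_cons.mp hr with he | hm
        · refine ⟨c, (gfnRightA row c []).2, by rw [he], by rw [he], le_refl c,
            hstop, gfnRightA_le_len row c [] (by omega), ?_⟩
          intro i h1 h2
          exact gfnRightA_digits row c [] i h1 h2
        · obtain ⟨s, stop, h1, h2, h3, h4, h5, h6⟩ := ih (gfnRightA row c []).2 (by omega) run hm
          exact ⟨s, stop, h1, h2, by omega, h4, h5, h6⟩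
      · rw [dif_neg hd] at hr
        obtain ⟨s, stop, h1, h2, h3, h4, h5, h6⟩ := ih (c + 1) (by omega) run hr
        exact ⟨s, stop, h1, h2, by omega, h4, h5, h6⟩
    · rw [runsFromA, dif_neg hl] at hr
      simp at hr

-- ---------- A's loop computes a fold over the run decomposition ----------

theorem rowLoopA_eq (grid : List (List Char)) (r : Int) (row : List Char) :
    ∀ (n c : Nat) (total : Int), row.length - c ≤ n →
    (c = 0 ∨ dAt row c = false ∨ dAt row (c - 1) = false) →
    rowLoopA grid r row c total =
      (runsFromA row c).foldl
        (fun t run => if isAdjacentA grid r run.1 (run.2.1 - 1) then t + run.2.2 else t) total := by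
  intro n
  induction n with
  | zero =>
    intro c total h _
    rw [rowLoopA, dif_neg (by omega), runsFromA, dif_neg (by omega)]
    simp
  | succ n ih =>
    intro c total h hinv
    by_cases hl : c < row.length
    · by_cases hd : PySem.Chars.isdigit (row[c]'hl) = true
      · have hleft : gfnLeftA row c = c := by
          have hstart : c = 0 ∨ dAt row (c - 1) = false := by
            rcases hinv with h0 | hfalse | hprev
            · exact Or.inl h0
            · rw [dAt_eq_isdigit row c hl] at hfalse
              rw [hfalse] at hd
              exact absurd hd (by simp)
            · exact Or.inr hprev
          rcases Nat.eq_zero_or_pos c with h0 | hpos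
          · subst h0
            rw [gfnLeftA, dif_pos hl, if_pos hd, if_pos rfl]
          · rcases hstart with h0 | hprev
            · omega
            · rw [gfnLeftA, dif_pos hl, if_pos hd, if_neg (by omega)]
              have hc1 : c - 1 < row.length := by omega
              rw [dAt_eq_isdigit row (c - 1) hc1] at hprev
              rw [gfnLeftA, dif_pos hc1, if_neg (by simp [hprev])]
              omega
        have hstop := gfnRightA_snd_gt row c [] hl hd
        have hle := gfnRightA_le_len row c [] (by omega)
        rw [rowLoopA, dif_pos hl, dif_pos hd, runsFromA, dif_pos hl, dif_pos hd]
        simp only [getFullNumberA, hleft, List.foldl_cons]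
        have hsub : (gfnRightA row c []).2 - 1 + 1 = (gfnRightA row c []).2 := by omega
        have hcast : (((gfnRightA row c []).2 - 1 : Nat) : Int) = ((gfnRightA row c []).2 : Int) - 1 := by
          omega
        rw [hsub, hcast]
        exact ih (gfnRightA row c []).2 _ (by omega)
          (Or.inr (Or.inl (gfnRightA_stop_not_dig row c [])))
      · rw [rowLoopA, dif_pos hl, dif_neg hd, runsFromA, dif_pos hl, dif_neg hd]
        refine ih (c + 1) total (by omega) (Or.inr (Or.inr ?_))
        simp only [Nat.add_sub_cancel]
        rw [dAt_eq_isdigit row c hl]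
        simp [hd]
    · rw [rowLoopA, dif_neg hl, runsFromA, dif_neg hl]
      simp

-- ---------- B's fold computes the same run decomposition ----------

def finishB (row : List Char) (st : List (Int × Int × Int) × Option (Int × List Char)) :
    List (Int × Int × Int) :=
  match st.2 with
  | none => st.1
  | some cur => st.1 ++ [(cur.1, PySem.List.len row, (PySem.Int.ofChars? cur.2).getD 0)]

theorem rowRunsB_eq_finish (row : List Char) :
    rowRunsB row = finishB row ((PySem.List.enumerate row).foldl rowRunsStepB ([], none)) := rfl

theorem rb_main (row : List Char) : ∀ (n c : Nat), row.length - c ≤ n → c ≤ row.length →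
    (∀ runs, finishB row
        ((PySem.List.enumerate (row.drop c) (c : Int)).foldl rowRunsStepB (runs, none)) =
      runs ++ runsFromA row c) ∧
    (∀ runs (s : Int) (ds : List Char), finishB row
        ((PySem.List.enumerate (row.drop c) (c : Int)).foldl rowRunsStepB (runs, some (s, ds))) =
      runs ++ ((s, ((gfnRightA row c ds).2 : Int),
          (PySem.Int.ofChars? (gfnRightA row c ds).1).getD 0) ::
        runsFromA row (gfnRightA row c ds).2)) := by
  intro n
  induction n with
  | zero =>
    intro c h hc
    have hce : c = row.length := by omega
    subst hce
    rw [List.drop_length]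
    constructor
    · intro runs
      rw [runsFromA, dif_neg (by omega)]
      simp [finishB]
    · intro runs s ds
      rw [gfnRightA, dif_neg (by omega)]
      have h2 : runsFromA row ((ds, row.length) : List Char × Nat).2 = [] := by
        rw [runsFromA]
        rw [dif_neg (by simp)]
      rw [h2]
      simp [finishB, PySem.List.len]
  | succ n ih =>
    intro c h hc
    by_cases hl : c < row.length
    · have hdrop : row.drop c = row[c] :: row.drop (c + 1) := List.drop_eq_getElem_cons hl
      have hcast : (c : Int) + 1 = ((c + 1 : Nat) : Int) := by omega
      obtain ⟨ih1, ih2⟩ := ih (c + 1) (by omega) (by omega)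
      by_cases hd : PySem.Chars.isdigit (row[c]'hl) = true
      · constructor
        · intro runs
          rw [hdrop, PySem.List.enumerate_cons, List.foldl_cons]
          have hstep : rowRunsStepB (runs, none) ((c : Int), row[c]'hl) =
              (runs, some ((c : Int), [row[c]'hl])) := by
            simp [rowRunsStepB, hd]
          rw [hstep, hcast, ih2 runs (c : Int) [row[c]'hl]]
          have hunf : gfnRightA row c [] = gfnRightA row (c + 1) [row[c]'hl] := by
            rw [gfnRightA, dif_pos hl, if_pos hd]
            simp
          conv_rhs => rw [runsFromA]
          rw [dif_pos hl, dif_pos hd, hunf]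
        · intro runs s ds
          rw [hdrop, PySem.List.enumerate_cons, List.foldl_cons]
          have hstep : rowRunsStepB (runs, some (s, ds)) ((c : Int), row[c]'hl) =
              (runs, some (s, ds ++ [row[c]'hl])) := by
            simp [rowRunsStepB, hd]
          rw [hstep, hcast, ih2 runs s (ds ++ [row[c]'hl])]
          have hunf : gfnRightA row c ds = gfnRightA row (c + 1) (ds ++ [row[c]'hl]) := by
            rw [gfnRightA, dif_pos hl, if_pos hd]
          rw [hunf]
      · constructor
        · intro runs
          rw [hdrop, PySem.List.enumerate_cons, List.foldl_cons]
          have hstep : rowRunsStepB (runs, none) ((c : Int), row[c]'hl) = (runs, none) := by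
            simp [rowRunsStepB, hd]
          rw [hstep, hcast, ih1 runs]
          conv_rhs => rw [runsFromA]
          rw [dif_pos hl, dif_neg hd]
        · intro runs s ds
          rw [hdrop, PySem.List.enumerate_cons, List.foldl_cons]
          have hstep : rowRunsStepB (runs, some (s, ds)) ((c : Int), row[c]'hl) =
              (runs ++ [(s, (c : Int), (PySem.Int.ofChars? ds).getD 0)], none) := by
            simp [rowRunsStepB, hd]
          rw [hstep, hcast, ih1 _]
          rw [gfnRightA, dif_pos hl, if_neg hd]
          have hre : runsFromA row c = runsFromA row (c + 1) := by
            rw [runsFromA]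
            rw [dif_pos hl, dif_neg hd]
          simp [hre]
    · -- c = row.length: same as the base case
      have hce : c = row.length := by omega
      subst hce
      rw [List.drop_length]
      constructor
      · intro runs
        rw [runsFromA, dif_neg (by omega)]
        simp [finishB]
      · intro runs s ds
        rw [gfnRightA, dif_neg (by omega)]
        have h2 : runsFromA row ((ds, row.length) : List Char × Nat).2 = [] := by
          rw [runsFromA]
          rw [dif_neg (by simp)]
        rw [h2]
        simp [finishB, PySem.List.len]

theorem rowRunsB_eq_runsFromA (row : List Char) : rowRunsB row = runsFromA row 0 := by
  have := (rb_main row row.length 0 (by omega) (by omega)).1 []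
  rw [List.drop_zero] at this
  rw [rowRunsB_eq_finish]
  have h0 : ((0 : Nat) : Int) = (0 : Int) := rfl
  rw [h0] at this
  simpa using this

-- ---------- the shaded set ----------

theorem mem_set_foldl {α β : Type} [BEq α] [LawfulBEq α] (P : β → α → Prop)
    (f : PySem.Set α → β → PySem.Set α)
    (hf : ∀ (s : PySem.Set α) (b : β) (x : α), x ∈ f s b ↔ x ∈ s ∨ P b x) (l : List β) :
    ∀ (s0 : PySem.Set α) (x : α), x ∈ l.foldl f s0 ↔ x ∈ s0 ∨ ∃ b ∈ l, P b x := by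
  induction l with
  | nil => simp
  | cons b l ihl =>
    intro s0 x
    rw [List.foldl_cons, ihl, hf, List.exists_mem_cons_iff]
    tauto

theorem mem_shadeB (s : PySem.Set (Int × Int)) (r c : Int) (x : Int × Int) :
    x ∈ shadeB s r c ↔ x ∈ s ∨ (|x.1 - r| ≤ 1 ∧ |x.2 - c| ≤ 1) := by
  rw [shadeB]
  rw [mem_set_foldl (fun dr x => ∃ dc ∈ ([-1, 0, 1] : List Int), x = (r + dr, c + dc))
    _ (fun s dr x => mem_set_foldl (fun dc x => x = (r + dr, c + dc))
      _ (fun s dc x => PySem.Set.mem_add s _ x) _ s x)]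
  constructor
  · rintro (hx | ⟨dr, hdr, dc, hdc, rfl⟩)
    · exact Or.inl hx
    · right
      simp only [List.mem_cons, List.mem_singleton, List.not_mem_nil, or_false] at hdr hdc
      refine ⟨?_, ?_⟩
      · have e : r + dr - r = dr := by ring
        show |r + dr - r| ≤ 1
        rw [e]
        rcases hdr with rfl | rfl | rfl <;> decide
      · have e : c + dc - c = dc := by ring
        show |c + dc - c| ≤ 1
        rw [e]
        rcases hdc with rfl | rfl | rfl <;> decide
  · rintro (hx | ⟨h1, h2⟩)
    · exact Or.inl hx
    · right
      rw [abs_le] at h1 h2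
      refine ⟨x.1 - r, by simp; omega, x.2 - c, by simp; omega, ?_⟩
      obtain ⟨x1, x2⟩ := x
      simp only [Prod.mk.injEq]
      constructor <;> simp only at h1 h2 ⊢ <;> omega

theorem mem_shadedSetB (grid : List (List Char)) (x : Int × Int) :
    PySem.Set.contains (shadedSetB grid) x = true ↔
    ∃ (a : Nat) (_ : a < grid.length) (b : Nat) (_ : b < grid[a].length),
      isSymbolB grid[a][b] = true ∧ |x.1 - (a : Int)| ≤ 1 ∧ |x.2 - (b : Int)| ≤ 1 := by
  have hcont : PySem.Set.contains (shadedSetB grid) x = true ↔ x ∈ shadedSetB grid :=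
    List.contains_iff_mem
  have hrow : ∀ (s : PySem.Set (Int × Int)) (rp : Int × List Char) (y : Int × Int),
      y ∈ (PySem.List.enumerate rp.2).foldl
        (fun s cp => if isSymbolB cp.2 then shadeB s rp.1 cp.1 else s) s ↔
      y ∈ s ∨ ∃ cp ∈ PySem.List.enumerate rp.2,
        isSymbolB cp.2 = true ∧ |y.1 - rp.1| ≤ 1 ∧ |y.2 - cp.1| ≤ 1 := by
    intro s rp y
    exact mem_set_foldl
      (fun (cp : Int × Char) (y : Int × Int) =>
        isSymbolB cp.2 = true ∧ |y.1 - rp.1| ≤ 1 ∧ |y.2 - cp.1| ≤ 1) _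
      (fun s (cp : Int × Char) y => by
        by_cases hsym : isSymbolB cp.2 = true
        · rw [if_pos hsym, mem_shadeB]
          simp [hsym]
        · rw [if_neg hsym]
          simp [hsym]) _ s y
  rw [hcont, shadedSetB, mem_set_foldl _ _ hrow]
  constructor
  · rintro (hx | ⟨rp, hrp, cp, hcp, hsym, h1, h2⟩)
    · exact absurd hx (by simp [PySem.Set.empty])
    · rw [PySem.List.mem_enumerate_iff] at hrp
      obtain ⟨a, ha, hrpe⟩ := hrp
      subst hrpe
      rw [PySem.List.mem_enumerate_iff] at hcp
      obtain ⟨b, hb, hcpe⟩ := hcp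
      subst hcpe
      simp only [zero_add] at hsym h1 h2 hb ⊢
      exact ⟨a, ha, b, hb, hsym, h1, h2⟩
  · rintro ⟨a, ha, b, hb, hsym, h1, h2⟩
    right
    refine ⟨((a : Int), grid[a]), ?_, ((b : Int), grid[a][b]), ?_, hsym, h1, h2⟩
    · rw [PySem.List.mem_enumerate_iff]
      refine ⟨a, ha, ?_⟩
      simp
    · rw [PySem.List.mem_enumerate_iff]
      refine ⟨b, hb, ?_⟩
      simp

-- ---------- digits are not symbols; the direction table ----------

theorem digit_not_symbol (ch : Char) (h : PySem.Chars.isdigit ch = true) :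
    isSymbolB ch = false := by
  simp only [PySem.Chars.isdigit, Bool.and_eq_true, decide_eq_true_eq] at h
  obtain ⟨h1, h2⟩ := h
  have h1' : 48 ≤ ch.toNat := h1
  have h2' : ch.toNat ≤ 57 := h2
  have heq : ∀ (k : Nat), ch.toNat = k → ch = Char.ofNat k := by
    intro k hk
    rw [← hk, Char.ofNat_toNat]
  have hmem : ch ∈ "0123456789.".toList := by
    have hcases : ch.toNat = 48 ∨ ch.toNat = 49 ∨ ch.toNat = 50 ∨ ch.toNat = 51 ∨
        ch.toNat = 52 ∨ ch.toNat = 53 ∨ ch.toNat = 54 ∨ ch.toNat = 55 ∨ ch.toNat = 56 ∨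
        ch.toNat = 57 := by omega
    rcases hcases with hk|hk|hk|hk|hk|hk|hk|hk|hk|hk <;> rw [heq _ hk] <;> decide
  simp only [isSymbolB, Bool.not_eq_false', List.contains_iff_mem]
  exact hmem

theorem mem_directionsA (d : Int × Int) :
    d ∈ directionsA ↔ |d.1| ≤ 1 ∧ |d.2| ≤ 1 ∧ d ≠ (0, 0) := by
  constructor
  · intro h
    fin_cases h <;> refine ⟨by norm_num, by norm_num, by decide⟩
  · rintro ⟨h1, h2, h3⟩
    obtain ⟨d1, d2⟩ := d
    simp only [Prod.fst, Prod.snd] at h1 h2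
    rw [abs_le] at h1 h2
    obtain ⟨h1a, h1b⟩ := h1
    obtain ⟨h2a, h2b⟩ := h2
    interval_cases d1 <;> interval_cases d2 <;> simp_all [directionsA] <;> decide

-- ---------- the adjacency tests agree on a run ----------

theorem isSymbolA_eq : isSymbolA = isSymbolB := rfl

theorem adj_eq (grid : List (List Char)) (rN : Nat) (hr : rN < grid.length)
    (s stop : Nat) (hss : s < stop) (hstop : stop ≤ grid[rN].length)
    (hdig : ∀ i, s ≤ i → i < stop → dAt grid[rN] i = true) :
    isAdjacentA grid (rN : Int) (s : Int) ((stop : Int) - 1) =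
      (PySem.List.pyRange (s : Int) (stop : Int) 1).any
        (fun c => PySem.Set.contains (shadedSetB grid) ((rN : Int), c)) := by
  have harg : (stop : Int) - 1 + 1 = (stop : Int) := by ring
  rw [isAdjacentA, harg, Bool.eq_iff_iff, List.any_eq_true, List.any_eq_true]
  constructor
  · rintro ⟨c, hc, hin⟩
    rw [List.any_eq_true] at hin
    obtain ⟨d, hd, hcond⟩ := hin
    simp only [Bool.and_eq_true, decide_eq_true_eq] at hcond
    obtain ⟨⟨hnr0, hnr1⟩, ⟨hnc0, hnc1⟩, hsym⟩ := hcond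
    obtain ⟨habs1, habs2, -⟩ := (mem_directionsA d).mp hd
    refine ⟨c, hc, ?_⟩
    rw [mem_shadedSetB]
    have ha : ((rN + d.1).toNat : Int) = (rN : Int) + d.1 := Int.toNat_of_nonneg hnr0
    have hb : ((c + d.2).toNat : Int) = c + d.2 := Int.toNat_of_nonneg hnc0
    have haN : (rN + d.1).toNat < grid.length := by omega
    rw [abs_le] at habs1 habs2
    refine ⟨(rN + d.1).toNat, haN, (c + d.2).toNat, ?_, ?_, ?_, ?_⟩
    · rw [List.getD_eq_getElem grid [] haN] at hnc1
      omega
    · rw [List.getD_eq_getElem grid [] haN] at hsym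
      rw [List.getD_eq_getElem _ ' ' (by rw [List.getD_eq_getElem grid [] haN] at hnc1; omega)]
        at hsym
      rw [← isSymbolA_eq]
      exact hsym
    · show |((rN : Int), c).1 - ((rN + d.1).toNat : Int)| ≤ 1
      rw [ha]
      simp only
      rw [abs_le]
      omega
    · show |((rN : Int), c).2 - ((c + d.2).toNat : Int)| ≤ 1
      rw [hb]
      simp only
      rw [abs_le]
      omega
  · rintro ⟨c, hc, hcont⟩
    rw [mem_shadedSetB] at hcont
    obtain ⟨a, ha, b, hb, hsym, h1, h2⟩ := hcont
    simp only at h1 h2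
    refine ⟨c, hc, ?_⟩
    rw [List.any_eq_true]
    have hcb : (s : Int) ≤ c ∧ c < (stop : Int) := PySem.List.mem_pyRange_one.mp hc
    have hne : ((a : Int) - rN, (b : Int) - c) ≠ ((0 : Int), (0 : Int)) := by
      intro hzero
      obtain ⟨hz1, hz2⟩ := Prod.mk.injEq .. ▸ hzero
      have haa : a = rN := by omega
      have hbb : (b : Int) = c := by omega
      have hsb : s ≤ b ∧ b < stop := by omega
      have := hdig b hsb.1 hsb.2
      rw [dAt_eq_isdigit grid[rN] b (by omega)] at this
      have hns := digit_not_symbol _ this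
      subst haa
      rw [hns] at hsym
      exact absurd hsym (by simp)
    refine ⟨((a : Int) - rN, (b : Int) - c), ?_, ?_⟩
    · rw [mem_directionsA]
      rw [abs_le] at h1 h2
      refine ⟨?_, ?_, hne⟩
      · show |(a : Int) - rN| ≤ 1
        rw [abs_le]
        omega
      · show |(b : Int) - c| ≤ 1
        rw [abs_le]
        omega
    · simp only [Bool.and_eq_true, decide_eq_true_eq]
      have he1 : (rN : Int) + ((a : Int) - rN) = (a : Int) := by ring
      have he2 : c + ((b : Int) - c) = (b : Int) := by ring
      rw [he1, he2]
      have hta : ((a : Int)).toNat = a := Int.toNat_natCast a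
      have htb : ((b : Int)).toNat = b := Int.toNat_natCast b
      rw [hta, htb, List.getD_eq_getElem grid [] ha, List.getD_eq_getElem _ ' ' hb]
      refine ⟨⟨by omega, by omega⟩, ⟨by omega, by omega⟩, ?_⟩
      rw [isSymbolA_eq]
      exact hsym

-- ---------- per-row equality and assembly ----------

theorem per_row (grid : List (List Char)) (k : Nat) (hk : k < grid.length) (total : Int) :
    rowLoopA grid (k : Int) grid[k] 0 total =
      (rowRunsB grid[k]).foldl (fun t run =>
        if (PySem.List.pyRange run.1 run.2.1 1).any
            (fun c => PySem.Set.contains (shadedSetB grid) ((k : Int), c))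
        then t + run.2.2 else t) total := by
  rw [rowLoopA_eq grid (k : Int) grid[k] grid[k].length 0 total (by omega) (Or.inl rfl)]
  rw [rowRunsB_eq_runsFromA]
  apply PySem.List.foldl_congr_mem
  intro t run hrun
  obtain ⟨s, stop, h1, h2, -, h4, h5, h6⟩ :=
    runsFromA_props grid[k] grid[k].length 0 (by omega) run hrun
  rw [h1, h2, adj_eq grid k hk s stop h4 h5 h6]

theorem sum_eq_alt (schematic : String) :
    sum_part_numbers schematic = sum_part_numbers_alt schematic := by
  have hparse : parseInputB schematic = parseInputA schematic := rfl
  rw [sum_part_numbers, sum_part_numbers_alt, hparse]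
  rw [PySem.List.enumerate_eq_map_pyRange (parseInputA schematic) [], List.foldl_map]
  apply PySem.List.foldl_congr_mem
  intro total r hmem
  have hb : (0 : Int) ≤ r ∧ r < PySem.List.len (parseInputA schematic) :=
    PySem.List.mem_pyRange_one.mp hmem
  obtain ⟨k, rfl⟩ : ∃ k : Nat, r = (k : Int) := ⟨r.toNat, (Int.toNat_of_nonneg hb.1).symm⟩
  have hk : k < (parseInputA schematic).length := by
    have h2 := hb.2
    rw [PySem.List.len_eq] at h2
    omega
  simp only [PySem.List.pyGetD_natCast, Int.toNat_natCast]
  rw [List.getD_eq_getElem _ [] hk]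
  exact per_row (parseInputA schematic) k hk total

-- ===== VERDICT (by name: the statement is the Claim_ definition above) =====
theorem sum_part_numbers_spec : Claim_equal_sum_part_numbers := by
  intro schematic _
  unfold Spec_sum_part_numbers
  exact sum_eq_alt schematic
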